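-- pv_equiv track=rewrite | github.com/muhammadfarooq85/CALICO-FALL-2025 | up/templates/up.py | solve
-- ===== SOURCE A (Python) =====
-- def solve(N: int, M: int, G: list[str]) -> int:
--     destroyed_columns = 0
--     for col in range(M):
--         for row in range(N):
--             if G[row][col] != '.':
--                 destroyed_columns += 1
--                 break
--     return destroyed_columns
-- ===== SOURCE B (Python) =====
-- def solve(N: int, M: int, G: list[str]) -> int:
--     # Row-major sweep over the first N rows, collecting the set of columns
--     # that contain a non-dot character; the answer is the size of that set.
--     destroyed = set()
--     for row in G[:max(0, N)]:
--         for col in range(M):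
--             if row[col] != '.':
--                 destroyed.add(col)
--     return len(destroyed)
-- ===== Notes on version B (the rewrite author's own statement) =====
-- stated objective: alternative
-- what changed: B traverses the grid row-major in one pass over the row strings themselves, collecting the set of column indices that contain a non-dot character and returning its size, instead of A's column-outer index loop that scans each column's rows with an early break and a counter.
-- outside the precondition, e.g. on solve(2, 1, ['x', '']): A returns 1, B raises IndexError; on solve(5, 1, ['x']): A returns 1, B returns 1
import Mathlib
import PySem

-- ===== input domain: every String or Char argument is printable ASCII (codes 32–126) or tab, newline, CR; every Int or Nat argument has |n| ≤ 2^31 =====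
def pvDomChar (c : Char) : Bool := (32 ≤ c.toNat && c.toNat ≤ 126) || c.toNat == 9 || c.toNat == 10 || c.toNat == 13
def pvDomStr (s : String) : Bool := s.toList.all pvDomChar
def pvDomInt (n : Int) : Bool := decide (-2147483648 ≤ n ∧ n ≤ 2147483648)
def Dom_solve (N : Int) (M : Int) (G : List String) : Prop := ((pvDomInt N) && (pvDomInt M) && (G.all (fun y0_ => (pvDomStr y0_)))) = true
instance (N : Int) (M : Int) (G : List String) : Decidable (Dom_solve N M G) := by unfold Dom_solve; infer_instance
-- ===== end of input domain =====

-- B replaces A's column-outer scan-with-break and counter by a single row-major pass over the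
-- row strings that collects the set of hit columns and returns its size (alternative decomposition, same cost).


-- ===== PORT A =====
-- the cell access G[row][col] (none exactly where Python raises IndexError)
def pyCellOpt (G : List String) (r c : Int) : Option Char :=
  (PySem.List.pyGet? G r).bind (fun s => PySem.Str.pyGet? s c)

-- `for row in range(N): if G[row][col] != '.': destroyed_columns += 1; break` as a lazy
-- counter loop (fuel = remaining iterations); a `none` cell is where Python raises
-- IndexError — Pre_solve excludes it, the port stops there like Python does.
def solveInner (G : List String) (col : Int) (row : Int) (fuel : Nat) (acc : Int) : Option Int :=
  match fuel with
  | 0 => some acc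
  | f + 1 =>
    match pyCellOpt G row col with
    | none => none
    | some ch => if ch ≠ '.' then some (acc + 1) else solveInner G col (row + 1) f acc

-- `for col in range(M): …`; on an inner IndexError (outside Pre_solve) the whole loop
-- stops, as Python's exception does.
def solveOuter (G : List String) (N : Int) (col : Int) (fuel : Nat) (acc : Int) : Int :=
  match fuel with
  | 0 => acc
  | f + 1 =>
    match solveInner G col 0 N.toNat acc with
    | none => acc
    | some acc' => solveOuter G N (col + 1) f acc'

def solve (N : Int) (M : Int) (G : List String) : Int :=
  solveOuter G N 0 M.toNat 0

-- ===== PORT B =====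
-- `for col in range(M): if row[col] != '.': destroyed.add(col)` as a lazy counter loop;
-- `none` = Python's IndexError (outside Pre_solve), the port stops there like Python does.
def altInner (t : String) (col : Int) (fuel : Nat) (s : PySem.Set Int) :
    Option (PySem.Set Int) :=
  match fuel with
  | 0 => some s
  | f + 1 =>
    match PySem.Str.pyGet? t col with
    | none => none
    | some ch =>
      altInner t (col + 1) f (if ch ≠ '.' then PySem.Set.add s col else s)

-- `for row in G[:max(0, N)]: …`
def altOuter (M : Int) (rows : List String) (s : PySem.Set Int) : PySem.Set Int :=
  match rows with
  | [] => s
  | t :: ts =>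
    match altInner t 0 M.toNat s with
    | none => s
    | some s' => altOuter M ts s'

def solve_alt (N : Int) (M : Int) (G : List String) : Int :=
  PySem.Set.len (altOuter M (PySem.List.slice G none (some (max 0 N))) PySem.Set.empty)

-- ===== PRECONDITION & SPEC =====
-- Pre_ excludes inputs where the Python programs raise IndexError (N exceeding the number of
-- rows, or a scanned row shorter than M) — except the trivial N ≤ 0 / M ≤ 0 cases, where no
-- cell is ever accessed.  It also excludes ragged/short grids on which A's early break happens
-- to skip the out-of-range access and A returns (see cites).
def Pre_solve (N : Int) (M : Int) (G : List String) : Prop :=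
  N ≤ 0 ∨ M ≤ 0 ∨
    (N ≤ (G.length : Int) ∧ ∀ s ∈ G.take N.toNat, M ≤ (s.toList.length : Int))
instance (N : Int) (M : Int) (G : List String) : Decidable (Pre_solve N M G) := by
  unfold Pre_solve; infer_instance

def pvWitness_solve : Int × Int × List String := (2, 3, [".x.", "..."])

def Spec_solve (N : Int) (M : Int) (G : List String) (out : Int) : Prop := out = solve_alt N M G
instance (N : Int) (M : Int) (G : List String) (out : Int) : Decidable (Spec_solve N M G out) := by unfold Spec_solve; infer_instance

-- ===== CLAIM (what is proved, stated in full; the proofs are below) =====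
def Claim_equal_solve : Prop := ∀ (N : Int) (M : Int) (G : List String), Dom_solve N M G → Pre_solve N M G → Spec_solve N M G (solve N M G)

-- ===== LEMMAS AND PROOFS =====

-- cell values once the accesses are known to succeed
def pyCell (G : List String) (r c : Int) : Char := (pyCellOpt G r c).getD '.'
def rowCell (t : String) (c : Int) : Char := (PySem.Str.pyGet? t c).getD '.'

-- in the rectangular main case every scanned access succeeds
theorem rowcell_some (M : Int) (t : String) (hlen : M ≤ (t.toList.length : Int)) :
    ∀ c : Int, 0 ≤ c → c < M → PySem.Str.pyGet? t c = some (rowCell t c) := by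
  intro c hc0 hcM
  have h : PySem.List.pyGet? t.toList c = some (t.toList[c.toNat]'(by omega)) :=
    PySem.List.pyGet?_eq_some_getElem _ hc0 (by omega)
  have hb : PySem.Str.pyGet? t c = PySem.List.pyGet? t.toList c := by simp
  simp only [rowCell, hb, h, Option.getD_some]

theorem cell_some (N M : Int) (G : List String)
    (hNG : N ≤ (G.length : Int))
    (hrows : ∀ s ∈ G.take N.toNat, M ≤ (s.toList.length : Int)) :
    ∀ r c : Int, 0 ≤ r → r < N → 0 ≤ c → c < M →
      pyCellOpt G r c = some (pyCell G r c) := by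
  intro r c hr0 hrN hc0 hcM
  have hrlen : r < (G.length : Int) := lt_of_lt_of_le hrN hNG
  have hget : PySem.List.pyGet? G r = some G[r.toNat] :=
    PySem.List.pyGet?_eq_some_getElem G hr0 hrlen
  have hmem : G[r.toNat] ∈ G.take N.toNat := by
    have : (G.take N.toNat)[r.toNat]'(by simp; omega) = G[r.toNat] :=
      List.getElem_take
    exact this ▸ List.getElem_mem _
  have hstr := rowcell_some M _ (hrows _ hmem)
  simp only [pyCellOpt, pyCell, hget]
  rw [show ((some G[r.toNat]).bind fun a => PySem.Str.pyGet? a c) = PySem.Str.pyGet? G[r.toNat] c from rfl,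
     hstr c hc0 hcM, Option.getD_some]

-- A's inner loop returns acc+1 exactly when some scanned row hits the column
theorem innerA_eq (G : List String) (col : Int) :
    ∀ (fuel : Nat) (row acc : Int),
      (∀ i : Int, row ≤ i → i < row + fuel → pyCellOpt G i col ≠ none) →
      solveInner G col row fuel acc =
        some (if (PySem.List.pyRange row (row + fuel) 1).any
                  (fun r => pyCell G r col != '.') then acc + 1 else acc) := by
  intro fuel
  induction fuel with
  | zero =>
    intro row acc _
    simp [solveInner, PySem.List.pyRange_one_eq_nil (by omega : row + ((0:Nat):Int) ≤ row)]
  | succ f ih =>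
    intro row acc h
    have hcell : pyCellOpt G row col ≠ none := h row le_rfl (by push_cast; omega)
    obtain ⟨ch, hch⟩ := Option.ne_none_iff_exists'.mp hcell
    have hrange : PySem.List.pyRange row (row + ((f:Nat)+1:Nat)) 1
        = row :: PySem.List.pyRange (row + 1) (row + ((f:Nat)+1:Nat)) 1 :=
      PySem.List.pyRange_one_cons (by push_cast; omega)
    have hval : pyCell G row col = ch := by simp [pyCell, hch]
    by_cases hne : ch = '.'
    · have hs : solveInner G col row (f+1) acc = solveInner G col (row+1) f acc := by
        simp [solveInner, hch, hne]
      rw [hs, ih (row+1) acc (fun i h1 h2 => h i (by omega) (by push_cast at h2 ⊢; omega))]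
      have h2 : row + 1 + (f:Int) = row + ((f:Nat)+1:Nat) := by push_cast; ring
      rw [h2, hrange]
      have hfalse : (pyCell G row col != '.') = false := by simp [hval, hne]
      simp only [List.any_cons, hfalse, Bool.false_or]
    · have hs : solveInner G col row (f+1) acc = some (acc + 1) := by
        simp [solveInner, hch, hne]
      rw [hs, hrange]
      simp [hval, hne]

-- A's outer loop counts the hit columns it scans
theorem outerA_eq (G : List String) (N : Int) (hN : 0 ≤ N) :
    ∀ (fuel : Nat) (col acc : Int),
      (∀ c : Int, col ≤ c → c < col + fuel →
        ∀ r : Int, 0 ≤ r → r < N → pyCellOpt G r c ≠ none) →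
      solveOuter G N col fuel acc =
        acc + ((PySem.List.pyRange col (col + fuel) 1).countP
          (fun c => (PySem.List.pyRange 0 N 1).any (fun r => pyCell G r c != '.'))) := by
  intro fuel
  induction fuel with
  | zero =>
    intro col acc _
    simp [solveOuter, PySem.List.pyRange_one_eq_nil (by omega : col + ((0:Nat):Int) ≤ col)]
  | succ f ih =>
    intro col acc h
    have hNn : (0:Int) + (N.toNat : Int) = N := by omega
    have hinner := innerA_eq G col N.toNat 0 acc
      (fun i h1 h2 => h col le_rfl (by push_cast; omega) i h1 (hNn ▸ h2))
    rw [hNn] at hinner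
    have hrange : PySem.List.pyRange col (col + ((f:Nat)+1:Nat)) 1
        = col :: PySem.List.pyRange (col + 1) (col + ((f:Nat)+1:Nat)) 1 :=
      PySem.List.pyRange_one_cons (by push_cast; omega)
    have hstep : solveOuter G N col (f+1) acc =
        solveOuter G N (col+1) f
          (if (PySem.List.pyRange 0 N 1).any (fun r => pyCell G r col != '.')
            then acc + 1 else acc) := by
      by_cases hany : (PySem.List.pyRange 0 N 1).any (fun r => pyCell G r col != '.')
      · simp [solveOuter, hinner, hany]
      · simp [solveOuter, hinner, hany]
    rw [hstep, ih (col+1) _ (fun c h1 h2 r hr1 hr2 =>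
          h c (by omega) (by push_cast at h2 ⊢; omega) r hr1 hr2)]
    have h2 : col + 1 + (f:Int) = col + ((f:Nat)+1:Nat) := by push_cast; ring
    rw [h2, hrange, List.countP_cons]
    by_cases hany : (PySem.List.pyRange 0 N 1).any (fun r => pyCell G r col != '.')
    · simp [hany]; push_cast; ring
    · simp [hany]

-- B's inner loop is the conditional-add fold over the scanned columns
theorem innerB_eq (t : String) :
    ∀ (fuel : Nat) (col : Int) (s : PySem.Set Int),
      (∀ c : Int, col ≤ c → c < col + fuel → PySem.Str.pyGet? t c ≠ none) →
      altInner t col fuel s =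
        some ((PySem.List.pyRange col (col + fuel) 1).foldl
          (fun s c => if rowCell t c ≠ '.' then PySem.Set.add s c else s) s) := by
  intro fuel
  induction fuel with
  | zero =>
    intro col s _
    simp [altInner, PySem.List.pyRange_one_eq_nil (by omega : col + ((0:Nat):Int) ≤ col)]
  | succ f ih =>
    intro col s h
    have hcell : PySem.Str.pyGet? t col ≠ none := h col le_rfl (by push_cast; omega)
    obtain ⟨ch, hch⟩ := Option.ne_none_iff_exists'.mp hcell
    have hval : rowCell t col = ch := by simp only [rowCell, hch, Option.getD_some]
    have hrange : PySem.List.pyRange col (col + ((f:Nat)+1:Nat)) 1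
        = col :: PySem.List.pyRange (col + 1) (col + ((f:Nat)+1:Nat)) 1 :=
      PySem.List.pyRange_one_cons (by push_cast; omega)
    have hstep : altInner t col (f+1) s =
        altInner t (col+1) f (if ch ≠ '.' then PySem.Set.add s col else s) := by
      simp only [altInner, hch]
    rw [hstep, ih (col+1) _ (fun c h1 h2 => h c (by omega) (by push_cast at h2 ⊢; omega))]
    have h2 : col + 1 + (f:Int) = col + ((f:Nat)+1:Nat) := by push_cast; ring
    rw [h2, hrange]
    simp [hval]

-- B's outer loop is the row-by-row fold of the inner one
theorem outerB_eq (M : Int) (hM : 0 ≤ M) :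
    ∀ (rows : List String) (s : PySem.Set Int),
      (∀ t ∈ rows, ∀ c : Int, 0 ≤ c → c < M → PySem.Str.pyGet? t c ≠ none) →
      altOuter M rows s =
        rows.foldl
          (fun s t => (PySem.List.pyRange 0 M 1).foldl
            (fun s c => if rowCell t c ≠ '.' then PySem.Set.add s c else s) s) s := by
  intro rows
  induction rows with
  | nil => intro s _; rfl
  | cons t ts ih =>
    intro s h
    have hMn : (0:Int) + (M.toNat : Int) = M := by omega
    have hinner := innerB_eq t M.toNat 0 s
      (fun c h1 h2 => h t List.mem_cons_self c h1 (hMn ▸ h2))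
    rw [hMn] at hinner
    have hstep : altOuter M (t :: ts) s =
        altOuter M ts
          ((PySem.List.pyRange 0 M 1).foldl
            (fun s c => if rowCell t c ≠ '.' then PySem.Set.add s c else s) s) := by
      simp [altOuter, hinner]
    rw [hstep, ih _ (fun t' ht' => h t' (List.mem_cons_of_mem _ ht')), List.foldl_cons]

-- membership after the per-row conditional-add fold
theorem mem_innerFold (t : String) (cols : List Int)
    (s : PySem.Set Int) (y : Int) :
    y ∈ cols.foldl
        (fun (s : PySem.Set Int) col =>
          if rowCell t col ≠ '.' then PySem.Set.add s col else s) s ↔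
      y ∈ s ∨ (y ∈ cols ∧ rowCell t y ≠ '.') := by
  induction cols generalizing s with
  | nil => simp
  | cons c cs ih =>
    simp only [List.foldl_cons]
    by_cases h : rowCell t c = '.'
    · rw [if_neg (not_not_intro h), ih]
      constructor
      · rintro (hs | hy); · exact Or.inl hs
        · exact Or.inr ⟨List.mem_cons_of_mem _ hy.1, hy.2⟩
      · rintro (hs | ⟨hm, hne⟩); · exact Or.inl hs
        · rcases List.mem_cons.mp hm with rfl | hm
          · exact absurd h hne
          · exact Or.inr ⟨hm, hne⟩
    · rw [if_pos h, ih]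
      simp only [PySem.Set.mem_add]
      constructor
      · rintro ((hs | rfl) | hy)
        · exact Or.inl hs
        · exact Or.inr ⟨List.mem_cons_self, h⟩
        · exact Or.inr ⟨List.mem_cons_of_mem _ hy.1, hy.2⟩
      · rintro (hs | ⟨hm, hne⟩); · exact Or.inl (Or.inl hs)
        · rcases List.mem_cons.mp hm with rfl | hm
          · exact Or.inl (Or.inr rfl)
          · exact Or.inr ⟨hm, hne⟩

theorem nodup_innerFold (t : String) (cols : List Int)
    (s : PySem.Set Int) (hs : s.Nodup) :
    (cols.foldl
        (fun (s : PySem.Set Int) col =>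
          if rowCell t col ≠ '.' then PySem.Set.add s col else s) s).Nodup := by
  induction cols generalizing s with
  | nil => exact hs
  | cons c cs ih =>
    simp only [List.foldl_cons]
    split
    · exact ih _ (PySem.Set.nodup_add s c hs)
    · exact ih _ hs

-- membership after the row fold
theorem mem_outerFold (M : Int) (rows : List String)
    (s : PySem.Set Int) (y : Int) :
    y ∈ rows.foldl
        (fun (s : PySem.Set Int) t =>
          (PySem.List.pyRange 0 M 1).foldl
            (fun (s : PySem.Set Int) col =>
              if rowCell t col ≠ '.' then PySem.Set.add s col else s) s) s ↔
      y ∈ s ∨ (y ∈ PySem.List.pyRange 0 M 1 ∧ ∃ t ∈ rows, rowCell t y ≠ '.') := by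
  induction rows generalizing s with
  | nil => simp
  | cons t ts ih =>
    simp only [List.foldl_cons, ih, mem_innerFold]
    constructor
    · rintro ((hs | ⟨hm, hne⟩) | ⟨hm, t', ht', hne⟩)
      · exact Or.inl hs
      · exact Or.inr ⟨hm, t, List.mem_cons_self, hne⟩
      · exact Or.inr ⟨hm, t', List.mem_cons_of_mem _ ht', hne⟩
    · rintro (hs | ⟨hm, t', ht', hne⟩)
      · exact Or.inl (Or.inl hs)
      · rcases List.mem_cons.mp ht' with rfl | ht'
        · exact Or.inl (Or.inr ⟨hm, hne⟩)
        · exact Or.inr ⟨hm, t', ht', hne⟩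

theorem nodup_outerFold (M : Int) (rows : List String)
    (s : PySem.Set Int) (hs : s.Nodup) :
    (rows.foldl
        (fun (s : PySem.Set Int) t =>
          (PySem.List.pyRange 0 M 1).foldl
            (fun (s : PySem.Set Int) col =>
              if rowCell t col ≠ '.' then PySem.Set.add s col else s) s) s).Nodup := by
  induction rows generalizing s with
  | nil => exact hs
  | cons t ts ih => exact ih _ (nodup_innerFold t _ s hs)

-- the degenerate loops
theorem outerA_of_N_nonpos (G : List String) (N : Int) (hN : N ≤ 0) :
    ∀ (fuel : Nat) (col acc : Int), solveOuter G N col fuel acc = acc := by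
  intro fuel
  induction fuel with
  | zero => intro col acc; rfl
  | succ f ih =>
    intro col acc
    have h0 : N.toNat = 0 := by omega
    simp [solveOuter, h0, solveInner, ih]

theorem outerB_of_M_nonpos (M : Int) (hM : M ≤ 0) :
    ∀ (rows : List String) (s : PySem.Set Int), altOuter M rows s = s := by
  intro rows
  induction rows with
  | nil => intro s; rfl
  | cons t ts ih =>
    intro s
    have h0 : M.toNat = 0 := by omega
    simp [altOuter, h0, altInner, ih]

-- A's per-column row scan and B's scan of the taken row strings see the same cells
theorem hit_iff (N M : Int) (G : List String) (hN : 0 < N)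
    (hNG : N ≤ (G.length : Int)) (c : Int) :
    ((PySem.List.pyRange 0 N 1).any (fun r => pyCell G r c != '.')) = true ↔
      ∃ t ∈ G.take N.toNat, rowCell t c ≠ '.' := by
  rw [List.any_eq_true]
  constructor
  · rintro ⟨r, hr, hne⟩
    rw [PySem.List.mem_pyRange_one] at hr
    have hrn : r.toNat < G.length := by omega
    have hget : PySem.List.pyGet? G r = some G[r.toNat] :=
      PySem.List.pyGet?_eq_some_getElem G hr.1 (by omega)
    refine ⟨G[r.toNat], ?_, ?_⟩
    · have h : (G.take N.toNat)[r.toNat]'(by simp; omega) = G[r.toNat] :=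
        List.getElem_take
      exact h ▸ List.getElem_mem _
    · have : pyCell G r c = rowCell G[r.toNat] c := by
        simp [pyCell, pyCellOpt, rowCell, hget]
      simpa [this] using hne
  · rintro ⟨t, ht, hne⟩
    obtain ⟨i, hi, hti⟩ := List.getElem_of_mem ht
    have hiN : i < N.toNat := by
      have := hi; simp at this; omega
    have hilen : i < G.length := by
      have := hi; simp at this; omega
    have hgi : G[i] = t := by
      rw [← hti]; exact (List.getElem_take).symm
    refine ⟨(i : Int), ?_, ?_⟩
    · rw [PySem.List.mem_pyRange_one]; omega
    · have hget : PySem.List.pyGet? G (i : Int) = some G[i] :=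
        PySem.List.pyGet?_eq_some_getElem G (by omega) (by omega)
      have : pyCell G (i : Int) c = rowCell t c := by
        simp [pyCell, pyCellOpt, rowCell, hget, hgi]
      simpa [this] using hne

-- both sides in the rectangular main case
theorem main_case (N M : Int) (G : List String) (hN : 0 < N) (hM : 0 < M)
    (hNG : N ≤ (G.length : Int))
    (hrows : ∀ s ∈ G.take N.toNat, M ≤ (s.toList.length : Int)) :
    solve N M G = solve_alt N M G := by
  have hcell : ∀ r c : Int, 0 ≤ r → r < N → 0 ≤ c → c < M → pyCellOpt G r c ≠ none := by
    intro r c h1 h2 h3 h4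
    rw [cell_some N M G hNG hrows r c h1 h2 h3 h4]
    exact Option.some_ne_none _
  set p : Int → Bool :=
    fun c => (PySem.List.pyRange 0 N 1).any (fun r => pyCell G r c != '.') with hp
  have hMn : (0:Int) + (M.toNat : Int) = M := by omega
  -- A counts the hit columns
  have hA : solve N M G = ((PySem.List.pyRange 0 M 1).countP p) := by
    have := outerA_eq G N (le_of_lt hN) M.toNat 0 0
      (fun c h1 h2 r hr1 hr2 => hcell r c hr1 hr2 h1 (hMn ▸ h2))
    rw [hMn] at this
    simpa [solve, hp] using this
  -- B folds over the taken rows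
  have hslice : PySem.List.slice G none (some (max 0 N)) = G.take N.toNat := by
    rw [PySem.List.slice_to G (le_max_left 0 N)]
    congr 1
    omega
  have hB : altOuter M (PySem.List.slice G none (some (max 0 N))) PySem.Set.empty =
      (G.take N.toNat).foldl
        (fun s t => (PySem.List.pyRange 0 M 1).foldl
          (fun s c => if rowCell t c ≠ '.' then PySem.Set.add s c else s) s)
        PySem.Set.empty := by
    rw [hslice]
    refine outerB_eq M (le_of_lt hM) _ PySem.Set.empty ?_
    intro t ht c hc1 hc2
    rw [rowcell_some M t (hrows t ht) c hc1 hc2]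
    exact Option.some_ne_none _
  have hperm :
      ((G.take N.toNat).foldl
        (fun s t => (PySem.List.pyRange 0 M 1).foldl
          (fun s c => if rowCell t c ≠ '.' then PySem.Set.add s c else s) s)
        PySem.Set.empty).Perm ((PySem.List.pyRange 0 M 1).filter p) := by
    rw [List.perm_ext_iff_of_nodup
      (nodup_outerFold M _ PySem.Set.empty (by simp [PySem.Set.empty]))
      ((PySem.List.nodup_pyRange_one 0 M).filter p)]
    intro y
    rw [mem_outerFold, List.mem_filter]
    constructor
    · rintro (hs | ⟨hm, hhit⟩)
      · simp [PySem.Set.empty] at hs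
      · exact ⟨hm, (hit_iff N M G hN hNG y).mpr hhit⟩
    · rintro ⟨hm, hhit⟩
      exact Or.inr ⟨hm, (hit_iff N M G hN hNG y).mp hhit⟩
  rw [hA, List.countP_eq_length_filter]
  unfold solve_alt
  rw [hB, PySem.Set.len, ← hperm.length_eq]

-- ===== VERDICT (by name: the statement is the Claim_ definition above) =====
theorem solve_spec : Claim_equal_solve := by
  intro N M G _ hpre
  unfold Spec_solve
  by_cases hN : N ≤ 0
  · have hA : solve N M G = 0 := outerA_of_N_nonpos G N hN M.toNat 0 0
    have hslice : PySem.List.slice G none (some (max 0 N)) = [] := by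
      rw [PySem.List.slice_to G (le_max_left 0 N)]
      have h0 : (max 0 N).toNat = 0 := by omega
      simp [h0]
    have hB : solve_alt N M G = 0 := by
      simp [solve_alt, hslice, altOuter, PySem.Set.len, PySem.Set.empty]
    rw [hA, hB]
  · by_cases hM : M ≤ 0
    · have hA : solve N M G = 0 := by
        have h0 : M.toNat = 0 := by omega
        simp [solve, h0, solveOuter]
      have hB : solve_alt N M G = 0 := by
        simp [solve_alt, outerB_of_M_nonpos M hM, PySem.Set.len, PySem.Set.empty]
      rw [hA, hB]
    · rcases hpre with h | h | ⟨hNG, hrows⟩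
      · omega
      · omega
      · exact main_case N M G (by omega) (by omega) hNG hrows
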